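-- pv_equiv track=rewrite | github.com/the-little-red/university-projects | criptografia/t2/playfair.py | dec
-- ===== SOURCE A (Python) =====
-- from copy import deepcopy
-- from collections import OrderedDict
--
-- def create_matrix(keyword):
--
--     # Define base alphabet matrix
--     alphamat = ['A', 'B', 'C', 'D', 'E',
--                 'F', 'G', 'H', 'I', 'K',
--                 'L', 'M', 'N', 'O', 'P',
--                 'Q', 'R', 'S', 'T', 'U',
--                 'V', 'W', 'X', 'Y', 'Z']
--
--     # Prepare cipher matrix with initial values
--     cipmat = deepcopy(alphamat)
--
--     # Remove repeated characters from keyword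
--     unqkey = ''.join(OrderedDict.fromkeys(keyword))
--
--     # Create list from key
--     key = list(unqkey)
--
--     # Assign unique letters of key to cipher matrix
--     for x in range(0, len(unqkey)):
--         cipmat[x] = unqkey[x]
--
--     # Create list of remaining letters not in the key
--     rmdr = list(set(alphamat) - set(key))
--
--     # Order remaining letters alphabetically
--     rmdr.sort()
--
--     # Assign remaining letters to cipher matrix
--     for x in range(len(unqkey), len(cipmat)):
--         cipmat[x] = rmdr[x - len(unqkey)]
--
--     return cipmat
--
-- def dec(plntxt, key):
--
--     # Create new cipher table using given key
--     cipmat = create_matrix(key)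
--
--     wid = 5  # key table matrix width
--     buf = 'X'  # buffer character for ciphertext preparation
--
--     # split up the ciphertext into blocks of 2
--     tmp = []
--     for x in range(0, len(plntxt) // 2):
--         tmp.append(plntxt[(x * 2)] + plntxt[(x * 2) + 1])
--     plntxt = tmp
--
--     # transform the text based on cipher matrix
--     for x in range(0, len(plntxt)):
--
--         block = plntxt[x]  # select block
--
--         # seperate values of chosen block
--         a = block[0]
--         b = block[1]
--
--         # determine position of each value in cipher matrix
--         a_x = cipmat.index(a) % wid
--         a_y = cipmat.index(a) // wid
--         b_x = cipmat.index(b) % wid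
--         b_y = cipmat.index(b) // wid
--
--         # If each value is on the same row, assign to the value to the left
--         if(a_y == b_y):
--             if(a_x < 1):
--                 a_x = 4
--             else:
--                 a_x -= 1
--
--             if(b_x < 1):
--                 b_x = 4
--             else:
--                 b_x -= 1
--         # If both values are in the same column, assign to the value above
--         elif(a_x == b_x):
--             if(a_y < 1):
--                 a_y = 4
--             else:
--                 a_y -= 1
--
--             if(b_y < 1):
--                 b_y = 4
--             else:
--                 b_y -= 1
--         # If both x and y values are different, swap x values
--         else:
--             a_x, b_x = b_x, a_x
--
--         # Replace existing block with newly ciphered one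
--         a = cipmat[(a_y * wid) + a_x]
--         b = cipmat[(b_y * wid) + b_x]
--         plntxt[x] = a + b
--
--     return "".join(plntxt)
-- ===== SOURCE B (Python) =====
-- # Playfair decryption via a precomputed full digraph substitution table:
-- # all 625 ciphertext digraphs are decrypted once up front, then the text is
-- # decoded by pure dictionary lookups (no per-block coordinate arithmetic).
--
-- def dec(plntxt, key):
--     order = list(dict.fromkeys(key))
--     alpha = "ABCDEFGHIKLMNOPQRSTUVWXYZ"
--     rest = sorted(set(alpha) - set(order))
--     mat = (order + rest)[:25]
--
--     table = {}
--     for ia, ca in enumerate(mat):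
--         for ib, cb in enumerate(mat):
--             ra, ca_ = divmod(ia, 5)
--             rb, cb_ = divmod(ib, 5)
--             if ra == rb:
--                 ja, jb = ra * 5 + (ca_ - 1) % 5, rb * 5 + (cb_ - 1) % 5
--             elif ca_ == cb_:
--                 ja, jb = ((ra - 1) % 5) * 5 + ca_, ((rb - 1) % 5) * 5 + cb_
--             else:
--                 ja, jb = ra * 5 + cb_, rb * 5 + ca_
--             table[(ca, cb)] = mat[ja] + mat[jb]
--
--     return ''.join(table[(plntxt[2 * x], plntxt[2 * x + 1])]
--                    for x in range(len(plntxt) // 2))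
-- ===== Notes on version B (the rewrite author's own statement) =====
-- stated objective: alternative
-- what changed: B precomputes the complete 625-entry digraph substitution table (dict keyed by ciphertext char pairs) once from the key square, so decoding the text becomes a single dictionary lookup per 2-char block, with no .index scans and no row/column branch logic at decode time.
import Mathlib
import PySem

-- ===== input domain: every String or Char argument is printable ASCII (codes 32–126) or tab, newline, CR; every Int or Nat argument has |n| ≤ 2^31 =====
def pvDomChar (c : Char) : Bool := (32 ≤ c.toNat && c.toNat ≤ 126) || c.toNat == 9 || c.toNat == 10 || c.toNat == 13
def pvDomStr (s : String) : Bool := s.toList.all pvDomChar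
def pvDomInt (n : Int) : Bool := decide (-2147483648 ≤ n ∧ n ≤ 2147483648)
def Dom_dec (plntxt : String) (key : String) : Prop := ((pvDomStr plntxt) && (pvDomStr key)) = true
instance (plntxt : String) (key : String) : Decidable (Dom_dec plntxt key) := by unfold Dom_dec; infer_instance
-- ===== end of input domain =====

-- B precomputes the full 625-entry digraph substitution table once, so decoding
-- is a pure dictionary lookup per block (no .index scans, no per-block branches).

-- ===== PORT A =====
-- transliteration of create_matrix (rmdr = sorted set difference; the two
-- assignment loops become foldl over the index ranges, cipmat[x]=v is List.set)
def create_matrix (keyword : String) : List Char :=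
  let alphamat : List Char :=
    ['A','B','C','D','E','F','G','H','I','K','L','M','N','O','P',
     'Q','R','S','T','U','V','W','X','Y','Z']
  let cipmat := alphamat
  let unqkey := PySem.List.dedup keyword.toList        -- ''.join(OrderedDict.fromkeys(keyword))
  let key := unqkey                                    -- list(unqkey)
  let cipmat := (List.range unqkey.length).foldl
      (fun c x => c.set x (unqkey.getD x 'A')) cipmat  -- getD in range inside Pre_
  let rmdr := PySem.List.sorted
      (PySem.Set.diff (PySem.Set.ofList alphamat) key) (fun c => c) false
  let cipmat := (List.range' unqkey.length (cipmat.length - unqkey.length)).foldl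
      (fun c x => c.set x (rmdr.getD (x - unqkey.length) 'A')) cipmat  -- getD in range
  cipmat

-- A's three-way branch, on the (x,y) coordinates, returning the two flat indices
def decIdx (aX aY bX bY : Nat) : Nat × Nat :=
  if aY = bY then
    (aY * 5 + (if aX < 1 then 4 else aX - 1), bY * 5 + (if bX < 1 then 4 else bX - 1))
  else if aX = bX then
    ((if aY < 1 then 4 else aY - 1) * 5 + aX, (if bY < 1 then 4 else bY - 1) * 5 + bX)
  else
    (aY * 5 + bX, bY * 5 + aX)

-- body of A's transform loop for one block (index? = .index; some inside Pre_)
def decBlock (cipmat : List Char) (a b : Char) : Char × Char :=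
  let ai := (PySem.List.index? cipmat a).getD 0
  let bi := (PySem.List.index? cipmat b).getD 0
  let p := decIdx (ai % 5) (ai / 5) (bi % 5) (bi / 5)
  (cipmat.getD p.1 ' ', cipmat.getD p.2 ' ')

def dec (plntxt : String) (key : String) : String :=
  let cipmat := create_matrix key
  let l := plntxt.toList
  -- split into blocks of 2
  let tmp := (List.range (l.length / 2)).map
      (fun x => (l.getD (2 * x) ' ', l.getD (2 * x + 1) ' '))  -- getD in range
  -- transform each block, then "".join
  let tmp2 := tmp.map (fun blk => decBlock cipmat blk.1 blk.2)
  String.ofList (tmp2.flatMap (fun p => [p.1, p.2]))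

-- ===== PORT B =====
def pfAlpha : List Char := "ABCDEFGHIKLMNOPQRSTUVWXYZ".toList

-- mat = (order + rest)[:25]
def pfMat (key : String) : List Char :=
  let order := PySem.List.dedup key.toList
  let rest := PySem.List.sorted
      (PySem.Set.diff (PySem.Set.ofList pfAlpha) order) (fun c => c) false
  (order ++ rest).take 25

-- the body of B's table loop: divmod coordinates, the three-way modular shift,
-- and the 2-char replacement string mat[ja] + mat[jb]
def pfShift (ia ib : Int) : Int × Int :=
  let ra := PySem.Int.floordiv ia 5
  let ca := PySem.Int.mod ia 5
  let rb := PySem.Int.floordiv ib 5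
  let cb := PySem.Int.mod ib 5
  if ra = rb then
    (ra * 5 + PySem.Int.mod (ca - 1) 5, rb * 5 + PySem.Int.mod (cb - 1) 5)
  else if ca = cb then
    (PySem.Int.mod (ra - 1) 5 * 5 + ca, PySem.Int.mod (rb - 1) 5 * 5 + cb)
  else
    (ra * 5 + cb, rb * 5 + ca)

def pfEntry (mat : List Char) (ia ib : Int) : String :=
  String.ofList [PySem.List.pyGetD mat (pfShift ia ib).1 ' ',
                 PySem.List.pyGetD mat (pfShift ia ib).2 ' ']

-- table[(ca, cb)] = pfEntry, over the two nested enumerate loops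
def pfTable (mat : List Char) : PySem.Dict (Char × Char) String :=
  (PySem.List.enumerate mat).foldl (fun d p =>
    (PySem.List.enumerate mat).foldl (fun d q =>
      d.insert (p.2, q.2) (pfEntry mat p.1 q.1)) d)
  PySem.Dict.empty

def dec_alt (plntxt : String) (key : String) : String :=
  let mat := pfMat key
  let table := pfTable mat
  let l := plntxt.toList
  PySem.Str.join "" ((List.range (l.length / 2)).map (fun x =>
    (table.get? (l.getD (2 * x) ' ', l.getD (2 * x + 1) ' ')).getD ""))

-- ===== PRECONDITION & SPEC =====
-- Pre_ excludes exactly the inputs where A raises: a key with more than 25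
-- distinct characters (IndexError in create_matrix) and ciphertext whose paired
-- characters are not in the 25-char matrix (ValueError from .index).
def Pre_dec (plntxt : String) (key : String) : Prop :=
  (PySem.List.dedup key.toList).length ≤ 25 ∧
  (plntxt.toList.take (2 * (plntxt.toList.length / 2))).all
    (fun c => (pfMat key).contains c) = true
instance (plntxt : String) (key : String) : Decidable (Pre_dec plntxt key) := by
  unfold Pre_dec; infer_instance

def pvWitness_dec : String × String := ("HI", "KEY")

def Spec_dec (plntxt : String) (key : String) (out : String) : Prop := out = dec_alt plntxt key
instance (plntxt : String) (key : String) (out : String) : Decidable (Spec_dec plntxt key out) := by unfold Spec_dec; infer_instance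

-- ===== CLAIM (what is proved, stated in full; the proofs are below) =====
def Claim_equal_dec : Prop := ∀ (plntxt : String) (key : String), Dom_dec plntxt key → Pre_dec plntxt key → Spec_dec plntxt key (dec plntxt key)


-- ===== LEMMAS AND PROOFS =====

-- assigning f x at indices a, a+1, …, a+n-1 rewrites that segment of the list
lemma foldl_set_range' {α : Type} (f : Nat → α) :
    ∀ (n a : Nat) (c : List α), a + n ≤ c.length →
    (List.range' a n).foldl (fun acc x => acc.set x (f x)) c
      = c.take a ++ (List.range' a n).map f ++ c.drop (a + n) := by
  intro n
  induction n with
  | zero => intro a c h; simp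
  | succ n ih =>
    intro a c h
    rw [List.range'_succ, List.foldl_cons,
        ih (a + 1) (c.set a (f a)) (by simp; omega),
        List.set_eq_take_cons_drop (f a) (show a < c.length by omega)]
    rw [List.take_append, List.drop_append]
    have hta : (c.take a).length = a := by
      simp [List.length_take]; omega
    rw [List.take_of_length_le (by omega), hta]
    simp only [Nat.add_sub_cancel_left, List.map_cons]
    have h1 : (c.take a).drop (a + 1 + n) = [] := by
      apply List.drop_eq_nil_of_le; omega
    rw [h1]
    have h2 : a + 1 + n - a = n + 1 := by omega
    rw [h2]
    simp [List.drop_drop]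
    omega

-- map of an indexed read over the index range is the list itself
lemma map_getD_range'_sub {α : Type} (r : List α) (d : α) (a k : Nat) (hk : k ≤ r.length) :
    (List.range' a k).map (fun x => r.getD (x - a) d) = r.take k := by
  apply List.ext_getElem
  · simp [List.length_take]; omega
  · intro i h1 h2
    simp only [List.getElem_map, List.getElem_range', List.getElem_take]
    have hi : i < k := by simpa using h1
    have he : a + 1 * i - a = i := by omega
    rw [he, List.getD_eq_getElem r d (by omega)]

-- the 25-letter alphabet as both ports write it
lemma alpha_toList :
    "ABCDEFGHIKLMNOPQRSTUVWXYZ".toList =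
      ['A','B','C','D','E','F','G','H','I','K','L','M','N','O','P',
       'Q','R','S','T','U','V','W','X','Y','Z'] := by decide

-- |alpha \\ key| + |distinct key| ≥ 25
lemma rest_length_ge (key : String) :
    25 ≤ (PySem.Set.diff
        (PySem.Set.ofList
          (['A','B','C','D','E','F','G','H','I','K','L','M','N','O','P',
            'Q','R','S','T','U','V','W','X','Y','Z'] : List Char))
        (PySem.List.dedup key.toList)).length
      + (PySem.List.dedup key.toList).length := by
  set al : List Char :=
    ['A','B','C','D','E','F','G','H','I','K','L','M','N','O','P',
     'Q','R','S','T','U','V','W','X','Y','Z'] with hal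
  set u := PySem.List.dedup key.toList with hu
  set df := PySem.Set.diff (PySem.Set.ofList al) u with hdf
  have hsub : al ⊆ df ++ u := by
    intro c hc
    by_cases hcu : c ∈ u
    · exact List.mem_append_right _ hcu
    · refine List.mem_append_left _ ?_
      rw [hdf, PySem.Set.mem_diff]
      exact ⟨by rw [PySem.Set.mem_ofList]; exact hc, hcu⟩
  have hnd : al.Nodup := by decide
  have h1 : al.toFinset.card = al.length := List.toFinset_card_of_nodup hnd
  have h2 : al.toFinset ⊆ (df ++ u).toFinset := by
    intro c hc
    rw [List.mem_toFinset] at *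
    exact hsub hc
  have h3 : (df ++ u).toFinset.card ≤ (df ++ u).length := List.toFinset_card_le _
  have h4 := Finset.card_le_card h2
  have h5 : (df ++ u).length = df.length + u.length := List.length_append ..
  have h6 : al.length = 25 := by decide
  omega

-- the matrices of the two ports coincide
lemma mat_eq (key : String) (h : (PySem.List.dedup key.toList).length ≤ 25) :
    create_matrix key = pfMat key := by
  have halpha := alpha_toList
  simp only [create_matrix, pfMat, pfAlpha, halpha]
  set al : List Char :=
    ['A','B','C','D','E','F','G','H','I','K','L','M','N','O','P',
     'Q','R','S','T','U','V','W','X','Y','Z'] with hal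
  set u := PySem.List.dedup key.toList with hu
  set rm := PySem.List.sorted (PySem.Set.diff (PySem.Set.ofList al) u)
      (fun c => c) false with hrm
  have hall : al.length = 25 := by decide
  -- first loop fills in the key letters
  have hmap : (List.range' 0 u.length).map (fun x => u.getD x 'A') = u := by
    have := map_getD_range'_sub u 'A' 0 u.length (le_refl _)
    simpa using this
  have l1 : (List.range u.length).foldl (fun c x => c.set x (u.getD x 'A')) al
      = u ++ al.drop u.length := by
    rw [List.range_eq_range', foldl_set_range' _ u.length 0 al (by omega), hmap]
    simp
  rw [l1]
  -- second loop fills in the remaining letters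
  have hlen2 : (u ++ al.drop u.length).length = 25 := by
    simp [List.length_drop]; omega
  have hrest := rest_length_ge key
  rw [← hal, ← hu] at hrest
  have hsl : rm.length = (PySem.Set.diff (PySem.Set.ofList al) u).length := by
    rw [hrm]; exact PySem.List.length_sorted _ _ _
  have hrmlen : 25 - u.length ≤ rm.length := by omega
  rw [foldl_set_range' _ _ _ _ (by omega)]
  rw [hlen2]
  rw [map_getD_range'_sub rm 'A' u.length (25 - u.length) hrmlen]
  have l3 : (u ++ al.drop u.length).take u.length = u := by
    rw [List.take_append_of_le_length (by simp), List.take_of_length_le (le_refl _)]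
  have l4 : (u ++ al.drop u.length).drop (u.length + (25 - u.length)) = [] := by
    apply List.drop_eq_nil_of_le; omega
  rw [l3, l4, List.take_append, List.take_of_length_le h]
  simp

lemma pfMat_nodup (key : String) : (pfMat key).Nodup := by
  unfold pfMat pfAlpha
  apply List.Nodup.sublist (List.take_sublist _ _)
  have h1 : (PySem.List.dedup key.toList).Nodup := PySem.List.nodup_dedup _
  have h2 : (PySem.List.sorted (PySem.Set.diff
      (PySem.Set.ofList "ABCDEFGHIKLMNOPQRSTUVWXYZ".toList)
      (PySem.List.dedup key.toList)) (fun c => c) false).Nodup := by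
    rw [(PySem.List.sorted_perm _ _ _).nodup_iff]
    exact PySem.Set.nodup_diff _ _ (PySem.Set.nodup_ofList _)
  refine List.Nodup.append h1 h2 ?_
  intro c hc1 hc2
  rw [PySem.List.mem_sorted, PySem.Set.mem_diff] at hc2
  exact hc2.2 hc1

lemma pfMat_length (key : String) :
    (pfMat key).length = 25 := by
  unfold pfMat pfAlpha
  rw [alpha_toList, List.length_take, List.length_append]
  have h2 : (PySem.List.sorted (PySem.Set.diff
      (PySem.Set.ofList
        (['A','B','C','D','E','F','G','H','I','K','L','M','N','O','P',
          'Q','R','S','T','U','V','W','X','Y','Z'] : List Char))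
      (PySem.List.dedup key.toList)) (fun c => c) false).length
      = (PySem.Set.diff (PySem.Set.ofList
        (['A','B','C','D','E','F','G','H','I','K','L','M','N','O','P',
          'Q','R','S','T','U','V','W','X','Y','Z'] : List Char))
        (PySem.List.dedup key.toList)).length := PySem.List.length_sorted _ _ _
  have h3 := rest_length_ge key
  omega

-- ---- lookup in the nested table fold ----

-- inner loop with a fixed first key component ≠ a leaves the lookup unchanged
lemma inner_get_of_ne (mat : List Char) (ca : Char) (ia : Int) :
    ∀ (t : List Char) (s : Int) (d : PySem.Dict (Char × Char) String)
      (a b : Char), a ≠ ca →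
    ((PySem.List.enumerate t s).foldl
        (fun d q => d.insert (ca, q.2) (pfEntry mat ia q.1)) d).get? (a, b)
      = d.get? (a, b) := by
  intro t
  induction t with
  | nil => intro s d a b _; simp [PySem.List.enumerate_nil]
  | cons x r ih =>
    intro s d a b ha
    rw [PySem.List.enumerate_cons, List.foldl_cons, ih (s + 1) _ a b ha]
    exact PySem.Dict.get?_insert_of_ne _ _ (by simp [ha])

-- inner loop over values not containing b leaves the lookup unchanged
lemma inner_get_of_not_mem (mat : List Char) (ca : Char) (ia : Int) :
    ∀ (t : List Char) (s : Int) (d : PySem.Dict (Char × Char) String)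
      (b : Char), b ∉ t →
    ((PySem.List.enumerate t s).foldl
        (fun d q => d.insert (ca, q.2) (pfEntry mat ia q.1)) d).get? (ca, b)
      = d.get? (ca, b) := by
  intro t
  induction t with
  | nil => intro s d b _; simp [PySem.List.enumerate_nil]
  | cons x r ih =>
    intro s d b hb
    have hbx : b ≠ x := by simp at hb; exact fun h => hb.1 h
    have hbr : b ∉ r := by simp at hb; exact hb.2
    rw [PySem.List.enumerate_cons, List.foldl_cons, ih (s + 1) _ b hbr]
    exact PySem.Dict.get?_insert_of_ne _ _ (by simp [hbx])

-- inner loop: the lookup at (ca, b) is the entry at b's first index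
lemma inner_get_of_mem (mat : List Char) (ca : Char) (ia : Int) :
    ∀ (t : List Char) (s : Int) (d : PySem.Dict (Char × Char) String)
      (b : Char), t.Nodup → b ∈ t →
    ((PySem.List.enumerate t s).foldl
        (fun d q => d.insert (ca, q.2) (pfEntry mat ia q.1)) d).get? (ca, b)
      = some (pfEntry mat ia (s + (((PySem.List.index? t b).getD 0 : Nat) : Int))) := by
  intro t
  induction t with
  | nil => intro s d b _ hb; simp at hb
  | cons x r ih =>
    intro s d b hnd hb
    rw [PySem.List.enumerate_cons, List.foldl_cons]
    by_cases hbx : b = x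
    · subst hbx
      rw [inner_get_of_not_mem mat ca ia r (s + 1) _ b (by simp at hnd; exact hnd.1)]
      rw [PySem.Dict.get?_insert_self, PySem.List.index?_cons_self]
      simp
    · have hbr : b ∈ r := by cases hb with
        | head => exact absurd rfl hbx
        | tail _ h => exact h
      rw [ih (s + 1) _ b (by simp at hnd; exact hnd.2) hbr]
      rw [PySem.List.index?_cons_of_ne r (Ne.symm hbx)]
      have hks : (PySem.List.index? r b).isSome := by
        rw [PySem.List.index?_isSome_iff]; exact hbr
      obtain ⟨k, hk⟩ := Option.isSome_iff_exists.mp hks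
      rw [hk]
      simp only [Option.map_some, Option.getD_some]
      congr 1
      push_cast
      ring_nf

-- outer loop over first components not containing a leaves the lookup unchanged
lemma outer_get_of_not_mem (mat : List Char) :
    ∀ (m : List Char) (s : Int) (d : PySem.Dict (Char × Char) String)
      (a b : Char), a ∉ m →
    ((PySem.List.enumerate m s).foldl (fun d p =>
        (PySem.List.enumerate mat).foldl
          (fun d q => d.insert (p.2, q.2) (pfEntry mat p.1 q.1)) d) d).get? (a, b)
      = d.get? (a, b) := by
  intro m
  induction m with
  | nil => intro s d a b _; simp [PySem.List.enumerate_nil]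
  | cons x r ih =>
    intro s d a b ha
    have hax : a ≠ x := by simp at ha; exact fun h => ha.1 h
    have har : a ∉ r := by simp at ha; exact ha.2
    rw [PySem.List.enumerate_cons, List.foldl_cons, ih (s + 1) _ a b har]
    exact inner_get_of_ne mat x s mat 0 _ a b hax

-- full table lookup: first indices of both characters
lemma outer_get_of_mem (mat : List Char) (hmnd : mat.Nodup)
    (b : Char) (hb : b ∈ mat) :
    ∀ (m : List Char) (s : Int) (d : PySem.Dict (Char × Char) String)
      (a : Char), m.Nodup → a ∈ m →
    ((PySem.List.enumerate m s).foldl (fun d p =>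
        (PySem.List.enumerate mat).foldl
          (fun d q => d.insert (p.2, q.2) (pfEntry mat p.1 q.1)) d) d).get? (a, b)
      = some (pfEntry mat (s + (((PySem.List.index? m a).getD 0 : Nat) : Int))
                         (((PySem.List.index? mat b).getD 0 : Nat) : Int)) := by
  intro m
  induction m with
  | nil => intro s d a _ ha; simp at ha
  | cons x r ih =>
    intro s d a hnd ha
    rw [PySem.List.enumerate_cons, List.foldl_cons]
    by_cases hax : a = x
    · subst hax
      rw [outer_get_of_not_mem mat r (s + 1) _ a b (by simp at hnd; exact hnd.1)]
      rw [show PySem.List.enumerate mat = PySem.List.enumerate mat 0 from rfl]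
      rw [inner_get_of_mem mat a s mat 0 _ b hmnd hb]
      rw [PySem.List.index?_cons_self]
      simp
    · have har : a ∈ r := by cases ha with
        | head => exact absurd rfl hax
        | tail _ h => exact h
      rw [ih (s + 1) _ a (by simp at hnd; exact hnd.2) har]
      rw [PySem.List.index?_cons_of_ne r (Ne.symm hax)]
      have hks : (PySem.List.index? r a).isSome := by
        rw [PySem.List.index?_isSome_iff]; exact har
      obtain ⟨k, hk⟩ := Option.isSome_iff_exists.mp hks
      rw [hk]
      simp only [Option.map_some, Option.getD_some]
      congr 1
      push_cast
      ring_nf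

lemma table_get (mat : List Char) (hmnd : mat.Nodup) (a b : Char)
    (ha : a ∈ mat) (hb : b ∈ mat) :
    (pfTable mat).get? (a, b)
      = some (pfEntry mat (((PySem.List.index? mat a).getD 0 : Nat) : Int)
                         (((PySem.List.index? mat b).getD 0 : Nat) : Int)) := by
  unfold pfTable
  rw [show PySem.List.enumerate mat = PySem.List.enumerate mat 0 from rfl]
  rw [outer_get_of_mem mat hmnd b hb mat 0 _ a hmnd ha]
  simp

-- B's closed-form shift equals A's branch logic on in-range positions
lemma shift_eq : ∀ ia : Nat, ia < 25 → ∀ ib : Nat, ib < 25 →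
    pfShift (ia : Int) (ib : Int)
      = (((decIdx (ia % 5) (ia / 5) (ib % 5) (ib / 5)).1 : Int),
         ((decIdx (ia % 5) (ia / 5) (ib % 5) (ib / 5)).2 : Int)) := by
  decide

-- B's table entry at in-range indices is A's transformed block
lemma entry_eq_decIdx : ∀ ia : Nat, ia < 25 → ∀ ib : Nat, ib < 25 →
    ∀ (mat : List Char), mat.length = 25 →
    pfEntry mat (ia : Int) (ib : Int)
      = String.ofList [mat.getD (decIdx (ia % 5) (ia / 5) (ib % 5) (ib / 5)).1 ' ',
                   mat.getD (decIdx (ia % 5) (ia / 5) (ib % 5) (ib / 5)).2 ' '] := by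
  intro ia hia ib hib mat hlen
  unfold pfEntry
  rw [shift_eq ia hia ib hib]
  simp only [PySem.List.pyGetD_natCast]

-- ''.join(parts) concatenates
lemma join_empty (parts : List String) :
    PySem.Str.join "" parts = String.ofList ((parts.map String.toList).flatten) := by
  have h2 : ∀ (a b : String), a.toList = b.toList → a = b := by
    intro a b hab
    have := congrArg String.ofList hab
    simpa using this
  apply h2
  rw [PySem.Str.toList_join]
  simp only [String.toList_ofList]
  generalize parts.map String.toList = ps
  simp [PySem.Chars.join, List.intercalate]
  induction ps with
  | nil => rfl
  | cons x t ih => cases t <;> simp_all [List.intersperse]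

-- ===== VERDICT (by name: the statement is the Claim_ definition above) =====
theorem dec_spec : Claim_equal_dec := by
  intro plntxt key hdom hpre
  obtain ⟨h25, hmem'⟩ := hpre
  rw [List.all_eq_true] at hmem'
  have hmem : ∀ c ∈ plntxt.toList.take (2 * (plntxt.toList.length / 2)), c ∈ pfMat key := by
    intro c hc
    have := hmem' c hc
    simpa using this
  unfold Spec_dec
  simp only [dec, dec_alt]
  rw [mat_eq key h25]
  set l := plntxt.toList with hl
  set m := pfMat key with hm
  have hmlen : m.length = 25 := pfMat_length key
  have hmnd : m.Nodup := pfMat_nodup key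
  rw [join_empty]
  congr 1
  rw [List.map_map, List.map_map, List.flatMap_def, List.map_map]
  rw [← List.flatMap_def, ← List.flatMap_def]
  apply List.flatMap_congr
  intro x hx
  rw [List.mem_range] at hx
  have hmema : ∀ i : Nat, i < 2 * (l.length / 2) → l.getD i ' ' ∈ m := by
    intro i hi
    have hil : i < l.length := by omega
    rw [List.getD_eq_getElem l ' ' hil]
    have htk : i < (l.take (2 * (l.length / 2))).length := by
      simp [List.length_take]; omega
    have : l[i] = (l.take (2 * (l.length / 2)))[i]'htk := by
      rw [List.getElem_take]
    rw [this]
    exact hmem _ (List.getElem_mem htk)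
  have ha : l.getD (2 * x) ' ' ∈ m := hmema _ (by omega)
  have hb : l.getD (2 * x + 1) ' ' ∈ m := hmema _ (by omega)
  show [(decBlock m (l.getD (2 * x) ' ') (l.getD (2 * x + 1) ' ')).1,
        (decBlock m (l.getD (2 * x) ' ') (l.getD (2 * x + 1) ' ')).2]
      = (((pfTable m).get? (l.getD (2 * x) ' ', l.getD (2 * x + 1) ' ')).getD "").toList
  set a := l.getD (2 * x) ' '
  set b := l.getD (2 * x + 1) ' '
  have hka := (PySem.List.index?_isSome_iff (xs := m) (v := a)).mpr ha
  have hkb := (PySem.List.index?_isSome_iff (xs := m) (v := b)).mpr hb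
  obtain ⟨ka, hA⟩ := Option.isSome_iff_exists.mp hka
  obtain ⟨kb, hB⟩ := Option.isSome_iff_exists.mp hkb
  obtain ⟨hka25, -, -⟩ := PySem.List.getElem_of_index?_eq_some hA
  rw [hmlen] at hka25
  obtain ⟨hkb25, -, -⟩ := PySem.List.getElem_of_index?_eq_some hB
  rw [hmlen] at hkb25
  rw [table_get m hmnd a b ha hb, hA, hB]
  simp only [Option.getD_some]
  rw [entry_eq_decIdx ka hka25 kb hkb25 m hmlen]
  simp only [PySem.List.index?] at hA hB
  simp [decBlock, PySem.List.index?, hA, hB]
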